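-- pv_equiv track=rewrite | github.com/Jullija/PythonCourse | lab1/homework.py | check
-- ===== SOURCE A (Python) =====
-- import string
--
-- operators = '&|>^'
--
-- VAR = string.ascii_lowercase
--
-- def check(expr):
--     bracketsCounter = 0
--     state = True # False -oczekiwanie na operator lub nawias zamykający; True - oczekiwanie na zmienną lub nawias otwierający lub znak negacji;
--     for i in expr:
--         if state:
--             if i =='~':
--                 pass
--             else:
--                 if i not in VAR + '(' + '10':
--                     return False
--                 if i in VAR + '10':
--                     state = not state
--         else:
--             if i == '~':
--                 return False
--             else:
--                 if i not in operators + ')':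
--                     return False
--                 elif i in operators:
--                     state = not state
--
--
--     for i in expr:
--         if i == '(':
--             bracketsCounter += 1
--         elif i == ')':
--             bracketsCounter -= 1
--
--         if bracketsCounter < 0:
--             return False
--
--     return bracketsCounter == 0 and not state
-- ===== SOURCE B (Python) =====
-- import string
--
-- def check(expr):
--     depth = 0
--     need_operand = True
--     for ch in expr:
--         if need_operand:
--             if ch == '~':
--                 continue
--             if ch == '(':
--                 depth += 1
--             elif ch in string.ascii_lowercase or ch in '10':
--                 need_operand = False
--             else:
--                 return False
--         else:
--             if ch == ')':
--                 if depth == 0: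
--                     return False
--                 depth -= 1
--             elif ch in '&|>^':
--                 need_operand = True
--             else:
--                 return False
--     return depth == 0 and not need_operand
-- ===== Notes on version B (the rewrite author's own statement) =====
-- stated objective: simpler
-- what changed: Replaced A's two separate passes (a state machine over the whole string, then a second full scan counting brackets) by one fused pass that carries the expectation state and the bracket depth together, rejecting immediately when the depth would go negative.
import Mathlib
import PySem

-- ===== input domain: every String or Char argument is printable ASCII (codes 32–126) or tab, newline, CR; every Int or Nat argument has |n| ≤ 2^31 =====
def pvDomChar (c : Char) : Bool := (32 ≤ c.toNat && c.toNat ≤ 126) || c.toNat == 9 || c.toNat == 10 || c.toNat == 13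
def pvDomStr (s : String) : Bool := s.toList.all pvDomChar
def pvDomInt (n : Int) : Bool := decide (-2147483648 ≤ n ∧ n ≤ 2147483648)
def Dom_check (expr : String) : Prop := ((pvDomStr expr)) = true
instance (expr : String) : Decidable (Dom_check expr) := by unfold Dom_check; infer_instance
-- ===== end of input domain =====

-- B fuses A's two passes (state machine, then bracket count) into one pass carrying both; objective: simpler.

-- ===== PORT A =====
def pyVAR : List Char := ['a','b','c','d','e','f','g','h','i','j','k','l','m',
  'n','o','p','q','r','s','t','u','v','w','x','y','z']
def pyOps : List Char := ['&','|','>','^']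

-- first loop of A: state machine; none = early `return False`
def checkLoop1 : List Char → Bool → Option Bool
  | [], st => some st
  | c :: rest, st =>
    if st then
      if c = '~' then checkLoop1 rest st
      else if ¬ (c ∈ pyVAR ++ ['('] ++ ['1', '0']) then none
      else if c ∈ pyVAR ++ ['1', '0'] then checkLoop1 rest (!st)
      else checkLoop1 rest st
    else
      if c = '~' then none
      else if ¬ (c ∈ pyOps ++ [')']) then none
      else if c ∈ pyOps then checkLoop1 rest (!st)
      else checkLoop1 rest st

-- second loop of A: bracket counter; none = early `return False` on a negative counter
def checkLoop2 : List Char → Int → Option Int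
  | [], n => some n
  | c :: rest, n =>
    let n' : Int := if c = '(' then n + 1 else if c = ')' then n - 1 else n
    if n' < 0 then none else checkLoop2 rest n'

def check (expr : String) : Bool :=
  match checkLoop1 expr.toList true with
  | none => false
  | some st =>
    match checkLoop2 expr.toList 0 with
    | none => false
    | some n => (n == 0) && !st

-- ===== PORT B =====
def checkGo : List Char → Bool → Int → Bool
  | [], need, depth => (depth == 0) && !need
  | c :: rest, need, depth =>
    if need then
      if c = '~' then checkGo rest need depth
      else if c = '(' then checkGo rest need (depth + 1)
      else if c ∈ pyVAR ∨ c = '1' ∨ c = '0' then checkGo rest false depth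
      else false
    else
      if c = ')' then
        if depth == 0 then false else checkGo rest need (depth - 1)
      else if c ∈ pyOps then checkGo rest true depth
      else false

def check_alt (expr : String) : Bool := checkGo expr.toList true 0

-- ===== PRECONDITION & SPEC =====
def Spec_check (expr : String) (out : Bool) : Prop := out = check_alt expr
instance (expr : String) (out : Bool) : Decidable (Spec_check expr out) := by unfold Spec_check; infer_instance

-- ===== CLAIM (what is proved, stated in full; the proofs are below) =====
def Claim_equal_check : Prop := ∀ (expr : String), Dom_check expr → Spec_check expr (check expr)

-- ===== LEMMAS AND PROOFS =====

lemma checkGo_eq (l : List Char) : ∀ (st : Bool) (d : Int), 0 ≤ d →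
    checkGo l st d =
      (match checkLoop1 l st with
       | none => false
       | some st' =>
         match checkLoop2 l d with
         | none => false
         | some n => (n == 0) && !st') := by
  induction l with
  | nil =>
    intro st d hd
    simp [checkGo, checkLoop1, checkLoop2]
  | cons c rest ih =>
    intro st d hd
    have hnd : ¬ d < 0 := by omega
    cases st with
    | true =>
      by_cases h1 : c = '~'
      · subst h1
        simp [checkGo, checkLoop1, checkLoop2, hnd, ih true d hd]
      · by_cases h2 : c = '('
        · subst h2
          have hd1 : ¬ d + 1 < 0 := by omega
          simp [checkGo, checkLoop1, checkLoop2, pyVAR, hd1,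
            ih true (d + 1) (by omega)]
        · by_cases h3 : c ∈ pyVAR ∨ c = '1' ∨ c = '0'
          · have hmem : c ∈ pyVAR ++ ['('] ++ ['1', '0'] := by
              simp [List.mem_append]; tauto
            have hmem2 : c ∈ pyVAR ++ ['1', '0'] := by
              simp [List.mem_append]; tauto
            have hnl : c ≠ '(' ∧ c ≠ ')' := by
              rcases h3 with h | h | h
              · constructor <;> (intro he; subst he; revert h; decide)
              · subst h; decide
              · subst h; decide
            simp [checkGo, checkLoop1, checkLoop2, h1, h2, h3, hmem2,
              hnl.2, hnd, ih false d hd]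
          · have hnmem : ¬ c ∈ pyVAR ++ ['('] ++ ['1', '0'] := by
              simp [List.mem_append]
              simp only [pyVAR, ] at h3 ⊢
              tauto
            simp [checkGo, checkLoop1, h1, h2, h3]
    | false =>
      by_cases h1 : c = '~'
      · subst h1
        simp [checkGo, checkLoop1, pyOps]
      · by_cases h2 : c = ')'
        · subst h2
          by_cases h0 : d = 0
          · subst h0
            simp [checkGo, checkLoop2]
            cases checkLoop1 (')' :: rest) false <;> rfl
          · have hd1 : ¬ d - 1 < 0 := by omega
            simp [checkGo, checkLoop1, checkLoop2, pyOps, h0, hd1,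
              ih false (d - 1) (by omega)]
        · by_cases h3 : c ∈ pyOps
          · have hnl : c ≠ '(' ∧ c ≠ ')' := by
              have h3' := h3
              simp only [pyOps, List.mem_cons, List.not_mem_nil, or_false] at h3'
              
              rcases h3' with h | h | h | h <;> subst h <;> exact ⟨by decide, by decide⟩
            have hmem : c ∈ pyOps ++ [')'] := by simp [List.mem_append]; tauto
            simp [checkGo, checkLoop1, checkLoop2, h1, h2, h3, hmem,
              hnl.1, hnd, ih true d hd]
          · have hnmem : ¬ c ∈ pyOps ++ [')'] := by
              simp [List.mem_append]; tauto
            simp [checkGo, checkLoop1, h1, h2, h3, hnmem]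

-- ===== VERDICT (by name: the statement is the Claim_ definition above) =====
theorem check_spec : Claim_equal_check := by
  intro expr _
  unfold Spec_check check check_alt
  exact (checkGo_eq expr.toList true 0 (le_refl 0)).symm
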